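-- pv_equiv track=rewrite | github.com/hcheng628/algorithm-problems | algorithm-problems/src/main/java/us/supercheng/algorithm/problems/leetcode/findthewidthofcolumnsofagrid/Solution.py | calLen
-- ===== SOURCE A (Python) =====
-- def calLen(n):
--     if n == 0:
--         return 1
--
--     ret = 1 if n < 0 else 0
--     nn = abs(n)
--
--     while nn > 0:
--         nn //= 10
--         ret += 1
--
--     return ret
-- ===== SOURCE B (Python) =====
-- def calLen(n):
--     return len(str(n))
-- ===== Notes on version B (the rewrite author's own statement) =====
-- stated objective: idiomatic
-- what changed: replaces the repeated-division digit-stripping loop (with zero and sign special cases) by converting the integer to its decimal string and returning its length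
import Mathlib
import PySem

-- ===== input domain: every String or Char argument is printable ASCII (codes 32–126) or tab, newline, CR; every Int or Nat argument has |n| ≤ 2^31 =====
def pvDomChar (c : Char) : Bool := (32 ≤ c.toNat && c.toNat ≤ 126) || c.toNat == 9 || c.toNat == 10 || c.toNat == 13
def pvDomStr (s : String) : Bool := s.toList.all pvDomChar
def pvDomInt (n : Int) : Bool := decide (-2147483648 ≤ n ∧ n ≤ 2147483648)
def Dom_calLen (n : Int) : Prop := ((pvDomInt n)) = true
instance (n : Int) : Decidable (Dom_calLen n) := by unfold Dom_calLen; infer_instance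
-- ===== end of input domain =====

-- B replaces A's digit-stripping //10 loop by len(str(n)): one decimal conversion, no loop (idiomatic).

-- ===== PORT A =====
-- the `while nn > 0: nn //= 10; ret += 1` loop, on state (nn, ret)
def calLenLoop (nn ret : Int) : Int :=
  if h : nn > 0 then
    calLenLoop (PySem.Int.floordiv nn 10) (ret + 1)
  else ret
termination_by nn.toNat
decreasing_by
  simp only [PySem.Int.floordiv]
  rw [Int.fdiv_eq_ediv]
  omega

def calLen (n : Int) : Int :=
  if n == 0 then 1
  else
    let ret : Int := if n < 0 then 1 else 0
    let nn : Int := |n|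
    calLenLoop nn ret

-- ===== PORT B =====
def calLen_alt (n : Int) : Int := PySem.Str.len (PySem.Int.toStr n)

-- ===== PRECONDITION & SPEC =====
def Spec_calLen (n : Int) (out : Int) : Prop := out = calLen_alt n
instance (n : Int) (out : Int) : Decidable (Spec_calLen n out) := by unfold Spec_calLen; infer_instance

-- ===== CLAIM (what is proved, stated in full; the proofs are below) =====
def Claim_equal_calLen : Prop := ∀ (n : Int), Dom_calLen n → Spec_calLen n (calLen n)

-- ===== LEMMAS AND PROOFS =====

-- number of iterations of A's loop, as a function of the (nonnegative) start value
def digCount (m : Nat) : Nat :=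
  if h : m = 0 then 0 else digCount (m / 10) + 1
decreasing_by exact Nat.div_lt_self (Nat.pos_of_ne_zero h) (by norm_num)

theorem calLenLoop_eq (m : Nat) : ∀ ret : Int, calLenLoop (m : Int) ret = ret + digCount m := by
  induction m using Nat.strong_induction_on with
  | _ m ih =>
    intro ret
    rw [calLenLoop]
    by_cases hm : m = 0
    · subst hm; simp [digCount]
    · have hpos : (0 : Int) < (m : Int) := by
        exact_mod_cast Nat.pos_of_ne_zero hm
      have hdiv : PySem.Int.floordiv (m : Int) 10 = ((m / 10 : Nat) : Int) := by
        simp only [PySem.Int.floordiv]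
        rw [Int.fdiv_eq_ediv]
        push_cast
        rfl
      have hrec : digCount m = digCount (m / 10) + 1 := by
        rw [digCount]; simp [hm]
      rw [dif_pos hpos, hdiv, ih (m / 10) (Nat.div_lt_self (Nat.pos_of_ne_zero hm) (by norm_num)),
        hrec]
      push_cast
      ring

theorem toDigitsCore_len (f : Nat) : ∀ (n : Nat) (l : List Char), n < f → n ≠ 0 →
    (Nat.toDigitsCore 10 f n l).length = l.length + digCount n := by
  induction f with
  | zero => intro n l h; omega
  | succ f ih =>
    intro n l hlt hne
    rw [Nat.toDigitsCore]
    have hrec : digCount n = digCount (n / 10) + 1 := by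
      rw [digCount]; simp [hne]
    by_cases h10 : n / 10 = 0
    · simp [h10, hrec, digCount]
    · have hnlt : n / 10 < f := by
        have := Nat.div_lt_self (Nat.pos_of_ne_zero hne) (show 1 < 10 by norm_num)
        omega
      rw [if_neg h10, ih (n / 10) _ hnlt h10]
      simp only [List.length_cons]
      omega

theorem toDigits_len (n : Nat) (hne : n ≠ 0) :
    (Nat.toDigits 10 n).length = digCount n := by
  have := toDigitsCore_len (n + 1) n [] (by omega) hne
  simpa [Nat.toDigits] using this

theorem calLen_spec : Claim_equal_calLen := by
  intro n _
  unfold Spec_calLen calLen calLen_alt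
  simp only [PySem.Str.len, PySem.Int.toList_toStr, PySem.Int.toChars]
  rcases lt_trichotomy n 0 with hneg | hzero | hpos
  · have hne : (n == 0) = false := by simp; omega
    have habs : |n| = ((n.natAbs : Nat) : Int) := Int.abs_eq_natAbs n
    have hnz : n.natAbs ≠ 0 := by omega
    rw [hne]
    simp only [Bool.false_eq_true, if_false, if_pos hneg, habs]
    rw [calLenLoop_eq]
    simp [List.length_cons, toDigits_len n.natAbs hnz]
    ring
  · subst hzero
    decide
  · have hne : (n == 0) = false := by simp; omega
    have habs : |n| = ((n.toNat : Nat) : Int) := by rw [abs_of_pos hpos]; omega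
    have hnz : n.toNat ≠ 0 := by omega
    rw [hne]
    simp only [Bool.false_eq_true, if_false, if_neg (by omega : ¬ n < 0), habs]
    rw [calLenLoop_eq]
    simp [toDigits_len n.toNat hnz]
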